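-- pv_equiv track=rewrite | github.com/AleVlaKon/algorytm | 10/10.2.3.py | count_pythagorean_triplets
-- ===== SOURCE A (Python) =====
-- from collections import defaultdict
--
-- def count_pythagorean_triplets(nums1, nums2, nums3):
--     first_dict = defaultdict(int)
--     second_dict = defaultdict(int)
--
--     for a in nums1:
--         for b in nums2:
--             first_dict[a ** 2 + b ** 2] += 1
--
--
--     for c in nums3:
--         second_dict[c ** 2] += 1
--
--
--     counter = 0
--     for key in first_dict:
--         counter += first_dict[key] * second_dict[key]
--
--     return counter
-- ===== SOURCE B (Python) =====
-- def count_pythagorean_triplets(nums1, nums2, nums3):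
--     # sort-merge join: sort both multisets and sweep them once with two pointers
--     sums = sorted(a * a + b * b for a in nums1 for b in nums2)
--     sqs = sorted(c * c for c in nums3)
--     n, m = len(sums), len(sqs)
--     total = 0
--     i, j = 0, 0
--     while i < n and j < m:
--         if sums[i] < sqs[j]:
--             i += 1
--         elif sqs[j] < sums[i]:
--             j += 1
--         else:
--             v = sums[i]
--             i2 = i
--             while i2 < n and sums[i2] == v:
--                 i2 += 1
--             j2 = j
--             while j2 < m and sqs[j2] == v:
--                 j2 += 1
--             total += (i2 - i) * (j2 - j)
--             i, j = i2, j2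
--     return total
-- ===== Notes on version B (the rewrite author's own statement) =====
-- stated objective: alternative
-- what changed: B replaces A's hash join (a defaultdict of pair-sum counts joined against a defaultdict of square counts) by a sort-merge join: it sorts the multiset of a*a+b*b values and the multiset of c*c values and sweeps both sorted lists once with two pointers, multiplying run lengths at each common value; no dictionary is built at all.
import Mathlib
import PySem

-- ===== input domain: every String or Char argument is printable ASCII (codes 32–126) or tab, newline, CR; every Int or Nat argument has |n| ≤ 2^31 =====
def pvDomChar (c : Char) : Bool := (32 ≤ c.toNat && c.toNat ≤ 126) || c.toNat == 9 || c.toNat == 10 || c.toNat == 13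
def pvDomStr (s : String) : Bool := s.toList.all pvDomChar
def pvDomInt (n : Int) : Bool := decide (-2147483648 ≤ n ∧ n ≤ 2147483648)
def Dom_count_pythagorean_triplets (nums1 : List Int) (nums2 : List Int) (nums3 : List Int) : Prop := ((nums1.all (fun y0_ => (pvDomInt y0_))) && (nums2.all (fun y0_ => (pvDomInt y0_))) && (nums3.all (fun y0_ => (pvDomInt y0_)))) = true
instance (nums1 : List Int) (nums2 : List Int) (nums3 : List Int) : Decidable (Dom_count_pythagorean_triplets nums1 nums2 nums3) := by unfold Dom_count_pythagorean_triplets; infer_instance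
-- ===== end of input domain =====

-- B replaces A's hash join (two defaultdicts) by a sort-merge join of the two sorted
-- multisets (objective: alternative algorithm, not claimed faster).

-- ===== PORT A =====
def count_pythagorean_triplets (nums1 : List Int) (nums2 : List Int) (nums3 : List Int) : Int :=
  let first_dict : PySem.Dict Int Int :=
    nums1.foldl (fun d a =>
      nums2.foldl (fun d b => d.modify (a ^ 2 + b ^ 2) 0 (· + 1)) d) PySem.Dict.empty
  let second_dict : PySem.Dict Int Int :=
    nums3.foldl (fun d c => d.modify (c ^ 2) 0 (· + 1)) PySem.Dict.empty
  first_dict.keys.foldl (fun counter key =>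
    counter + first_dict.getD key 0 * second_dict.getD key 0) 0

-- ===== PORT B =====
-- 'while i2 < n and sums[i2] == v: i2 += 1' — count of leading elements equal to v, plus the rest
def pvSkip (v : Int) : List Int → Int × List Int
  | [] => (0, [])
  | x :: xs => if x == v then ((pvSkip v xs).1 + 1, (pvSkip v xs).2) else (0, x :: xs)

theorem pvSkip_rest_length_le (v : Int) (l : List Int) : (pvSkip v l).2.length ≤ l.length := by
  induction l with
  | nil => simp [pvSkip]
  | cons x xs ih => simp only [pvSkip]; split; · simp; omega
                    · simp

def pvMergeCount : List Int → List Int → Int → Int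
  | [], _, total => total
  | _ :: _, [], total => total
  | x :: xs, y :: ys, total =>
    if x < y then pvMergeCount xs (y :: ys) total
    else if y < x then pvMergeCount (x :: xs) ys total
    else
      pvMergeCount (pvSkip x (x :: xs)).2 (pvSkip x (y :: ys)).2
        (total + (pvSkip x (x :: xs)).1 * (pvSkip x (y :: ys)).1)
  termination_by xs ys _ => xs.length + ys.length
  decreasing_by
  · simp
  · simp
  · have h1 := pvSkip_rest_length_le x xs
    have h2 := pvSkip_rest_length_le x (y :: ys)
    simp only [pvSkip, BEq.rfl, if_true] at *
    simp at h2 ⊢ <;> omega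

def count_pythagorean_triplets_alt (nums1 : List Int) (nums2 : List Int) (nums3 : List Int) : Int :=
  let sums := PySem.List.sorted (nums1.flatMap (fun a => nums2.map (fun b => a * a + b * b))) (fun x => x) false
  let sqs := PySem.List.sorted (nums3.map (fun c => c * c)) (fun x => x) false
  pvMergeCount sums sqs 0

-- ===== PRECONDITION & SPEC =====
def Spec_count_pythagorean_triplets (nums1 : List Int) (nums2 : List Int) (nums3 : List Int) (out : Int) : Prop := out = count_pythagorean_triplets_alt nums1 nums2 nums3
instance (nums1 : List Int) (nums2 : List Int) (nums3 : List Int) (out : Int) : Decidable (Spec_count_pythagorean_triplets nums1 nums2 nums3 out) := by unfold Spec_count_pythagorean_triplets; infer_instance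

-- ===== CLAIM =====
def Claim_equal_count_pythagorean_triplets : Prop := ∀ (nums1 : List Int) (nums2 : List Int) (nums3 : List Int), Dom_count_pythagorean_triplets nums1 nums2 nums3 → Spec_count_pythagorean_triplets nums1 nums2 nums3 (count_pythagorean_triplets nums1 nums2 nums3)

-- ===== LEMMAS AND PROOFS =====

-- A's nested increment loop builds the Counter of the flattened key list.
theorem pv_nested_counter (l1 l2 : List Int) (key : Int → Int → Int) :
    l1.foldl (fun d a =>
      l2.foldl (fun d b => d.modify (key a b) 0 (· + 1)) d) PySem.Dict.empty
    = PySem.Dict.counter (l1.flatMap (fun a => l2.map (key a))) := by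
  rw [PySem.Dict.counter_eq_foldl, List.foldl_flatMap]
  simp only [List.foldl_map]

-- Summing count(k) * g(k) over the distinct elements of P = summing g over P itself.
theorem pv_sum_dedup_count (P : List Int) (g : Int → Int) :
    ((PySem.Set.ofList P).map (fun k => (P.count k : Int) * g k)).sum
      = (P.map g).sum := by
  rw [← List.sum_toFinset _ (PySem.Set.nodup_ofList P)]
  have hfs : (PySem.Set.ofList P).toFinset = P.toFinset := by
    apply Finset.ext
    intro x
    simp [List.mem_toFinset, PySem.Set.mem_ofList]
  rw [hfs, Finset.sum_list_map_count]
  apply Finset.sum_congr rfl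
  intro k _
  simp

theorem pvSkip_eq (v : Int) (l : List Int) :
    pvSkip v l = (((l.takeWhile (fun y => y == v)).length : Int), l.dropWhile (fun y => y == v)) := by
  induction l with
  | nil => simp [pvSkip]
  | cons x xs ih =>
    by_cases hx : x = v
    · subst hx
      simp [pvSkip, List.takeWhile_cons_of_pos, List.dropWhile_cons_of_pos, ih]
    · simp [pvSkip, hx, List.takeWhile_cons_of_neg, List.dropWhile_cons_of_neg]

theorem pvSkip_sorted (v : Int) (l : List Int) (hs : l.Pairwise (· ≤ ·))
    (hge : ∀ z ∈ l, v ≤ z) :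
    (l.takeWhile (fun y => y == v)).length = l.count v ∧
      (∀ z ∈ l.dropWhile (fun y => y == v), v < z) := by
  induction l with
  | nil => simp
  | cons x xs ih =>
    rcases List.pairwise_cons.mp hs with ⟨hx, hxs⟩
    by_cases hxv : x = v
    · subst hxv
      obtain ⟨h1, h2⟩ := ih hxs (fun z hz => hx z hz)
      refine ⟨?_, ?_⟩
      · rw [List.takeWhile_cons_of_pos (by simp), List.count_cons_self]
        simp [h1]
      · intro z hz
        rw [List.dropWhile_cons_of_pos (by simp)] at hz
        exact h2 z hz
    · have hvx : v < x := lt_of_le_of_ne (hge x (by simp)) (Ne.symm hxv)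
      have hcount : (x :: xs).count v = 0 := by
        rw [List.count_eq_zero]
        intro hmem
        rcases List.mem_cons.mp hmem with h | h
        · exact hxv h.symm
        · have := hx v h; omega
      refine ⟨?_, ?_⟩
      · rw [List.takeWhile_cons_of_neg (by simp [hxv]), hcount]; simp
      · intro z hz
        rw [List.dropWhile_cons_of_neg (by simp [hxv])] at hz
        rcases List.mem_cons.mp hz with h | h
        · omega
        · have := hx z h; omega

theorem pv_count_takeWhile (v z : Int) (l : List Int) :
    (l.takeWhile (fun y => y == v)).count z
      = if z = v then (l.takeWhile (fun y => y == v)).length else 0 := by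
  induction l with
  | nil => simp
  | cons x xs ih =>
    by_cases hx : x = v
    · subst hx
      rw [List.takeWhile_cons_of_pos (by simp)]
      by_cases h : z = x
      · subst h; simp [List.count_cons, ih]
      · simp [List.count_cons, ih, h, Ne.symm h]
    · rw [List.takeWhile_cons_of_neg (by simp [hx])]; simp

-- A computes the sum, over the multiset of pair sums, of each value's multiplicity among nums3's squares.
theorem pv_A_as_sum (nums1 nums2 nums3 : List Int) :
    count_pythagorean_triplets nums1 nums2 nums3
      = ((nums1.flatMap (fun a => nums2.map (fun b => a * a + b * b))).map
          (fun k => (((nums3.map (fun c => c * c)).count k : Nat) : Int))).sum := by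
  unfold count_pythagorean_triplets
  rw [pv_nested_counter nums1 nums2 (fun a b => a ^ 2 + b ^ 2)]
  have hM : nums3.foldl (fun d c => d.modify (c ^ 2) 0 (· + 1)) PySem.Dict.empty
      = PySem.Dict.counter (nums3.map (fun c => c * c)) := by
    rw [PySem.Dict.counter_eq_foldl, List.foldl_map]
    simp only [pow_two]
  rw [hM]
  rw [PySem.List.foldl_add (g := fun key =>
    (PySem.Dict.counter (nums1.flatMap (fun a => nums2.map (fun b => a ^ 2 + b ^ 2)))).getD key 0
      * (PySem.Dict.counter (nums3.map (fun c => c * c))).getD key 0)]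
  simp only [PySem.Dict.keys_counter, PySem.Dict.getD_counter, zero_add]
  rw [pv_sum_dedup_count (nums1.flatMap (fun a => nums2.map (fun b => a ^ 2 + b ^ 2)))
      (fun k => (((nums3.map (fun c => c * c)).count k : Nat) : Int))]
  simp only [pow_two]

-- B's sweep over two sorted lists totals, for each element of the first, its multiplicity in the second.
theorem pv_merge_sum_aux (n : Nat) : ∀ (xs ys : List Int) (t : Int),
    xs.length + ys.length ≤ n → xs.Pairwise (· ≤ ·) → ys.Pairwise (· ≤ ·) →
    pvMergeCount xs ys t = t + (xs.map (fun x => ((ys.count x : Nat) : Int))).sum := by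
  induction n with
  | zero =>
    intro xs ys t hlen hxs hys
    cases xs with
    | nil => simp [pvMergeCount]
    | cons x xs => simp at hlen
  | succ n ih =>
    intro xs ys t hlen hxs hys
    cases xs with
    | nil => simp [pvMergeCount]
    | cons x xs =>
      cases ys with
      | nil => simp [pvMergeCount]
      | cons y ys =>
        rcases List.pairwise_cons.mp hxs with ⟨hx, hxs'⟩
        rcases List.pairwise_cons.mp hys with ⟨hy, hys'⟩
        rw [pvMergeCount]
        by_cases hlt : x < y
        · rw [if_pos hlt]
          have hnm : x ∉ y :: ys := by
            intro hmem
            rcases List.mem_cons.mp hmem with h | h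
            · omega
            · have := hy x h; omega
          rw [ih xs (y :: ys) t (by simp at hlen ⊢; omega) hxs' hys]
          simp [List.count_eq_zero.mpr hnm]
        · rw [if_neg hlt]
          by_cases hgt : y < x
          · rw [if_pos hgt]
            have hcnt : ∀ z ∈ x :: xs, ((y :: ys).count z : Int) = (ys.count z : Int) := by
              intro z hz
              have hzx : x ≤ z := by
                rcases List.mem_cons.mp hz with h | h
                · omega
                · exact hx z h
              rw [List.count_cons]
              have : ¬ (y = z) := by omega
              simp [this]
            rw [ih (x :: xs) ys t (by simp at hlen ⊢; omega) hxs hys']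
            congr 1
            apply congrArg
            exact List.map_congr_left (fun z hz => (hcnt z hz).symm)
          · have hxy : x = y := by omega
            rw [if_neg hgt]
            subst hxy
            -- unfold the two skips
            rw [pvSkip_eq, pvSkip_eq]
            dsimp only
            -- sorted facts for both lists
            have hge1 : ∀ z ∈ x :: xs, x ≤ z := by
              intro z hz; rcases List.mem_cons.mp hz with h | h
              · omega
              · exact hx z h
            have hge2 : ∀ z ∈ x :: ys, x ≤ z := by
              intro z hz; rcases List.mem_cons.mp hz with h | h
              · omega
              · exact hy z h
            obtain ⟨hc1, hd1⟩ := pvSkip_sorted x (x :: xs) hxs hge1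
            obtain ⟨hc2, hd2⟩ := pvSkip_sorted x (x :: ys) hys hge2
            set t1 := (x :: xs).takeWhile (fun y => y == x) with ht1
            set d1 := (x :: xs).dropWhile (fun y => y == x) with hd1e
            set t2 := (x :: ys).takeWhile (fun y => y == x) with ht2
            set d2 := (x :: ys).dropWhile (fun y => y == x) with hd2e
            have hsplit1 : t1 ++ d1 = x :: xs := by
              rw [ht1, hd1e]; exact List.takeWhile_append_dropWhile
            have hsplit2 : t2 ++ d2 = x :: ys := by
              rw [ht2, hd2e]; exact List.takeWhile_append_dropWhile
            have hsort1 : d1.Pairwise (· ≤ ·) := hxs.sublist (List.dropWhile_sublist _)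
            have hsort2 : d2.Pairwise (· ≤ ·) := hys.sublist (List.dropWhile_sublist _)
            have hlen1 : d1.length + d2.length ≤ n := by
              have e1 : d1 = xs.dropWhile (fun y => y == x) := by
                rw [hd1e, List.dropWhile_cons_of_pos (by simp)]
              have e2 : d2 = ys.dropWhile (fun y => y == x) := by
                rw [hd2e, List.dropWhile_cons_of_pos (by simp)]
              have l1 := (List.dropWhile_sublist (l := xs) (p := fun y => y == x)).length_le
              have l2 := (List.dropWhile_sublist (l := ys) (p := fun y => y == x)).length_le
              rw [e1, e2]
              simp at hlen; omega
            rw [ih d1 d2 _ hlen1 hsort1 hsort2]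
            -- now pure algebra about the sums
            have hsum : ((x :: xs).map (fun z => (((x :: ys).count z : Nat) : Int))).sum
                = (t1.length : Int) * (t2.length : Int)
                  + (d1.map (fun z => ((d2.count z : Nat) : Int))).sum := by
              conv_lhs => rw [← hsplit1]
              rw [List.map_append, List.sum_append]
              congr 1
              · -- every element of t1 is x, and (x::ys).count x = t2.length
                have hall : ∀ z ∈ t1, (((x :: ys).count z : Nat) : Int) = (t2.length : Int) := by
                  intro z hz
                  have hz' : z = x := by
                    have := List.mem_takeWhile_imp hz
                    simpa using this
                  subst hz'
                  exact_mod_cast congrArg (Nat.cast (R := Int)) hc2.symm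
                rw [List.map_congr_left hall]
                simp [mul_comm]
              · -- elements of d1 are > x, so they never hit t2 inside x::ys
                apply congrArg
                apply List.map_congr_left
                intro z hz
                have hzgt : x < z := hd1 z hz
                have : (x :: ys).count z = t2.count z + d2.count z := by
                  conv_lhs => rw [← hsplit2]
                  rw [List.count_append]
                have ht2z : t2.count z = 0 := by
                  rw [ht2, pv_count_takeWhile]
                  have : ¬ (z = x) := by omega
                  simp [this]
                rw [this, ht2z]
                simp
            rw [hsum]
            ring

theorem pv_merge_sum (xs ys : List Int) (t : Int)
    (hxs : xs.Pairwise (· ≤ ·)) (hys : ys.Pairwise (· ≤ ·)) :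
    pvMergeCount xs ys t = t + (xs.map (fun x => ((ys.count x : Nat) : Int))).sum :=
  pv_merge_sum_aux (xs.length + ys.length) xs ys t le_rfl hxs hys

theorem pv_ports_agree (nums1 nums2 nums3 : List Int) :
    count_pythagorean_triplets nums1 nums2 nums3
      = count_pythagorean_triplets_alt nums1 nums2 nums3 := by
  rw [pv_A_as_sum]
  unfold count_pythagorean_triplets_alt
  set P := nums1.flatMap (fun a => nums2.map (fun b => a * a + b * b)) with hP
  set Q := nums3.map (fun c => c * c) with hQ
  have hs1 : (PySem.List.sorted P (fun x => x) false).Pairwise (· ≤ ·) := by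
    have := PySem.List.sorted_pairwise (xs := P) (key := fun x => x)
    simpa using this
  have hs2 : (PySem.List.sorted Q (fun x => x) false).Pairwise (· ≤ ·) := by
    have := PySem.List.sorted_pairwise (xs := Q) (key := fun x => x)
    simpa using this
  rw [pv_merge_sum _ _ _ hs1 hs2]
  have hp1 : (PySem.List.sorted P (fun x => x) false).Perm P :=
    PySem.List.sorted_perm P (fun x => x) false
  have hp2 : (PySem.List.sorted Q (fun x => x) false).Perm Q :=
    PySem.List.sorted_perm Q (fun x => x) false
  have hmap : (PySem.List.sorted P (fun x => x) false).map
        (fun z => (((PySem.List.sorted Q (fun x => x) false).count z : Nat) : Int))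
      = (PySem.List.sorted P (fun x => x) false).map (fun z => ((Q.count z : Nat) : Int)) :=
    List.map_congr_left (fun z _ => by rw [hp2.count_eq z])
  rw [hmap, (hp1.map (fun z => ((Q.count z : Nat) : Int))).sum_eq]
  simp

-- ===== VERDICT =====
theorem count_pythagorean_triplets_spec : Claim_equal_count_pythagorean_triplets := by
  intro nums1 nums2 nums3 _
  unfold Spec_count_pythagorean_triplets
  exact pv_ports_agree nums1 nums2 nums3
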